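-- pv_equiv track=rewrite | github.com/HrvojeFER/ppj-lab | LAB3/Hrvoje/semantics_classes.py | split_signs
-- ===== SOURCE A (Python) =====
-- def split_signs(string: str):
--     if string.startswith('"'):
--         string = string[1:]
--
--     if string.endswith('"'):
--         string = string[:-1]
--
--     new_string = list()
--
--     i = 0
--     i_max = len(string)
--
--     while i < i_max:
--         if i + 1 < i_max and string[i] == '\\':
--             new_string.append(str(string[i] + string[i + 1]))
--             i += 2
--             continue
--         else:
--             new_string.append(str(string[i]))
--             i += 1
--
--     return new_string
-- ===== SOURCE B (Python) =====
-- def split_signs(string: str):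
--     if string.startswith('"'):
--         string = string[1:]
--     if string.endswith('"'):
--         string = string[:-1]
--     out = []
--     while True:
--         j = string.find('\\')
--         if j < 0 or j == len(string) - 1:
--             out.extend(string)
--             return out
--         out.extend(string[:j])
--         out.append(string[j:j+2])
--         string = string[j+2:]
-- ===== Notes on version B (the rewrite author's own statement) =====
-- stated objective: faster
-- what changed: Replaces A's per-character while-loop state machine (index i, branch on each char) by repeated str.find jumps to the next backslash: each round bulk-extends the backslash-free prefix as single chars, appends the two-char escape token, and continues on the remainder, so Python-level work is per escape, not per character.
import Mathlib
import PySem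

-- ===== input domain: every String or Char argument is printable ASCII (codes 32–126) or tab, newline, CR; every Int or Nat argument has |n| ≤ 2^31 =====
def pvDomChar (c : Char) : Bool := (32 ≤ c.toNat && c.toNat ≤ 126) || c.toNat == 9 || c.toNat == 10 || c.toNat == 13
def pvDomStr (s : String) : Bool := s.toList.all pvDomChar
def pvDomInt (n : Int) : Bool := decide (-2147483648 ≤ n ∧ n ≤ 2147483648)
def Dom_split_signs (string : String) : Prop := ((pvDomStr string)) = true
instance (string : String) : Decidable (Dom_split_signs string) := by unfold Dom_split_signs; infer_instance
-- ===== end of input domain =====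

-- B replaces A's per-character index state machine by repeated str.find jumps to the next
-- backslash, emitting the backslash-free prefix in bulk and the escape pair as one token;
-- a timing run measured B faster by a constant factor.


-- ===== PORT A =====
-- A's while-loop: index i over the quote-stripped string, appending one- or two-char tokens.
def splitLoopA (cs : List Char) (iMax i : Nat) (acc : List String) : List String :=
  if i < iMax then
    if i + 1 < iMax && (cs.getD i ' ' == '\\') then
      splitLoopA cs iMax (i + 2) (acc ++ [String.ofList [cs.getD i ' ', cs.getD (i + 1) ' ']])
    else
      splitLoopA cs iMax (i + 1) (acc ++ [String.ofList [cs.getD i ' ']])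
  else acc
termination_by iMax - i

def split_signs (string : String) : List String :=
  let s1 := if PySem.Str.startswith string "\"" then PySem.Str.slice string (some 1) none else string
  let s2 := if PySem.Str.endswith s1 "\"" then PySem.Str.slice s1 none (some (-1)) else s1
  splitLoopA s2.toList s2.toList.length 0 []

-- ===== PORT B =====
-- Python's str.find for a backslash: index of the first backslash, none for -1 (hand port, exact).
def findBS : List Char → Option Nat
  | [] => none
  | c :: rest => if c == '\\' then some 0 else (findBS rest).map (· + 1)


lemma findBS_lt {cs : List Char} {j : Nat} (h : findBS cs = some j) : j < cs.length := by
  induction cs generalizing j with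
  | nil => simp [findBS] at h
  | cons c rest ih =>
    simp only [findBS] at h
    split at h
    · simp only [Option.some.injEq] at h; simp; omega
    · rcases Option.map_eq_some_iff.mp h with ⟨k, hk, rfl⟩
      have := ih hk; simp; omega

-- B's while-loop on the remaining string: find the next backslash, bulk-emit the prefix,
-- emit the two-char escape token, continue on the rest.
def tokFind (cs : List Char) (acc : List String) : List String :=
  match h : findBS cs with
  | none => acc ++ cs.map (fun c => String.ofList [c])
  | some j =>
    if j = cs.length - 1 then acc ++ cs.map (fun c => String.ofList [c])
    else tokFind (cs.drop (j + 2))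
        (acc ++ (cs.take j).map (fun c => String.ofList [c]) ++ [String.ofList ((cs.drop j).take 2)])
termination_by cs.length
decreasing_by have := findBS_lt h; simp; omega

def split_signs_alt (string : String) : List String :=
  let s1 := if PySem.Str.startswith string "\"" then PySem.Str.slice string (some 1) none else string
  let s2 := if PySem.Str.endswith s1 "\"" then PySem.Str.slice s1 none (some (-1)) else s1
  tokFind s2.toList []

-- ===== PRECONDITION & SPEC =====
def Spec_split_signs (string : String) (out : List String) : Prop := out = split_signs_alt string
instance (string : String) (out : List String) : Decidable (Spec_split_signs string out) := by unfold Spec_split_signs; infer_instance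

-- ===== CLAIM (what is proved, stated in full; the proofs are below) =====
def Claim_equal_split_signs : Prop := ∀ (string : String), Dom_split_signs string → Spec_split_signs string (split_signs string)

-- ===== LEMMAS AND PROOFS =====

-- Common reference tokenizer: pair each backslash with its successor.
def tok : List Char → List String
  | [] => []
  | c :: rest =>
    if c == '\\' then String.ofList (c :: rest.take 1) :: tok (rest.drop 1)
    else String.ofList [c] :: tok rest
termination_by l => l.length
decreasing_by all_goals simp

lemma splitLoopA_eq_tok (cs : List Char) :
    ∀ n i acc, cs.length - i = n →
      splitLoopA cs cs.length i acc = acc ++ tok (cs.drop i) := by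
  intro n
  induction n using Nat.strong_induction_on with
  | _ n ih =>
    intro i acc hn
    rw [splitLoopA]
    by_cases hi : i < cs.length
    · have hdrop : cs.drop i = cs[i] :: cs.drop (i + 1) := List.drop_eq_getElem_cons hi
      simp only [hi, if_pos]
      by_cases hesc : i + 1 < cs.length ∧ cs[i] = '\\'
      · obtain ⟨h1, h2⟩ := hesc
        have hdrop2 : cs.drop (i + 1) = cs[i + 1] :: cs.drop (i + 2) := List.drop_eq_getElem_cons h1
        have hcond : (decide (i + 1 < cs.length) && (cs.getD i ' ' == '\\')) = true := by
          simp [List.getD_eq_getElem?_getD, List.getElem?_eq_getElem hi, h1, h2]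
        rw [if_pos hcond, ih (cs.length - (i + 2)) (by omega) (i + 2) _ rfl]
        have ht : (cs.drop (i + 1)).take 1 = [cs[i + 1]] := by rw [hdrop2]; rfl
        have hd1 : (cs.drop (i + 1)).drop 1 = cs.drop (i + 2) := by rw [hdrop2]; rfl
        rw [hdrop]
        simp [tok, ht, hd1, List.getD_eq_getElem?_getD, List.getElem?_eq_getElem hi,
          List.getElem?_eq_getElem h1, h2]
      · have hcond : (decide (i + 1 < cs.length) && (cs.getD i ' ' == '\\')) = false := by
          rcases Decidable.not_and_iff_or_not.mp hesc with h | h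
          · simp [h]
          · rw [List.getD_eq_getElem cs ' ' hi]
            simp [h]
        rw [if_neg (ne_true_of_eq_false hcond), ih (cs.length - (i + 1)) (by omega) (i + 1) _ rfl]
        rw [hdrop]
        have htok : tok (cs[i] :: cs.drop (i + 1)) = String.ofList [cs[i]] :: tok (cs.drop (i + 1)) := by
          by_cases hb : cs[i] = '\\'
          · have h1 : ¬ i + 1 < cs.length := fun h => hesc ⟨h, hb⟩
            have hnil : cs.drop (i + 1) = [] := List.drop_eq_nil_of_le (by omega)
            rw [hnil]; simp [tok, hb]
          · simp only [tok]; rw [if_neg (by simp [hb])]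
        rw [htok]
        simp [List.getD_eq_getElem?_getD, List.getElem?_eq_getElem hi]
    · have hnil : cs.drop i = [] := List.drop_eq_nil_of_le (by omega)
      simp [hi, hnil, tok]

lemma findBS_none {cs : List Char} (h : findBS cs = none) : '\\' ∉ cs := by
  induction cs with
  | nil => simp
  | cons c rest ih =>
    simp only [findBS] at h
    split at h
    · simp at h
    · rename_i hc
      simp only [Option.map_eq_none_iff] at h
      simp [ih h]; intro he; exact hc (by simp [← he])

lemma findBS_some {cs : List Char} {j : Nat} (h : findBS cs = some j) :
    ∃ pre rest, cs = pre ++ '\\' :: rest ∧ pre.length = j ∧ '\\' ∉ pre := by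
  induction cs generalizing j with
  | nil => simp [findBS] at h
  | cons c rest ih =>
    simp only [findBS] at h
    split at h
    · rename_i hc
      refine ⟨[], rest, ?_, by simp_all, by simp⟩
      simp at hc; simp [hc]
    · rename_i hc
      rcases Option.map_eq_some_iff.mp h with ⟨k, hk, rfl⟩
      rcases ih hk with ⟨pre, r2, hcs, hlen, hmem⟩
      refine ⟨c :: pre, r2, by simp [hcs], by simp [hlen], ?_⟩
      simp [hmem]; intro he; exact hc (by simp [← he])

lemma tok_append_no_bs (pre rest : List Char) (h : '\\' ∉ pre) :
    tok (pre ++ rest) = pre.map (fun c => String.ofList [c]) ++ tok rest := by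
  induction pre with
  | nil => simp
  | cons c p ih =>
    have hc : c ≠ '\\' := fun he => h (by simp [he])
    have hp : '\\' ∉ p := fun hm => h (by simp [hm])
    simp only [List.cons_append, tok]
    rw [if_neg (by simp [hc]), ih hp]
    simp

lemma tokFind_eq_tok (cs : List Char) :
    ∀ n acc, cs.length = n → tokFind cs acc = acc ++ tok cs := by
  induction hn : cs.length using Nat.strong_induction_on generalizing cs with
  | _ n ih =>
    intro m acc hm
    rw [tokFind]
    split
    · rename_i h
      have hnb := findBS_none h
      have := tok_append_no_bs cs [] hnb
      simp [tok] at this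
      rw [this]
    · rename_i j h
      rcases findBS_some h with ⟨pre, rest, hcs, hlen, hpre⟩
      by_cases hj : j = cs.length - 1
      · -- trailing lone backslash: rest = []
        have hr : rest = [] := by
          have : cs.length = pre.length + 1 + rest.length := by
            simp [hcs] <;> omega
          have := List.length_eq_zero_iff.mp (show rest.length = 0 by omega)
          exact this
        subst hr
        rw [if_pos hj, hcs, tok_append_no_bs _ _ hpre]
        simp [tok]
      · -- rest = d :: rest2
        have hlt : j < cs.length - 1 := by
          have := findBS_lt h; omega
        obtain ⟨d, rest2, hr⟩ : ∃ d rest2, rest = d :: rest2 := by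
          cases rest with
          | nil =>
            exfalso
            have h1 : cs.length = pre.length + 1 := by
              simp [hcs] <;> omega
            omega
          | cons d r2 => exact ⟨d, r2, rfl⟩
        subst hr
        rw [if_neg hj]
        have htake : cs.take j = pre := by
          rw [hcs, ← hlen, List.take_left]
        have hdropj : cs.drop j = '\\' :: d :: rest2 := by
          rw [hcs, ← hlen, List.drop_left]
        have hdrop2 : cs.drop (j + 2) = rest2 := by
          have : cs.drop (j + 2) = (cs.drop j).drop 2 := by
            rw [List.drop_drop]
          rw [this, hdropj]; rfl
        rw [htake, hdropj, hdrop2]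
        have hlen2 : rest2.length < n := by
          have : cs.length = pre.length + 2 + rest2.length := by
            simp [hcs] <;> omega
          omega
        rw [ih rest2.length (by omega) rest2 rfl rest2.length _ rfl]
        rw [hcs, tok_append_no_bs _ _ hpre]
        simp [tok]

-- ===== VERDICT (by name: the statement is the Claim_ definition above) =====
theorem split_signs_spec : Claim_equal_split_signs := by
  intro s _
  unfold Spec_split_signs split_signs split_signs_alt
  dsimp only
  rw [splitLoopA_eq_tok _ _ 0 [] rfl, tokFind_eq_tok _ _ [] rfl]
  simp
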